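-- pv_equiv track=rewrite | github.com/zehavitc/EliminatingDNAPatterns | dna_utils.py | contains_transversion
-- ===== SOURCE A (Python) =====
-- def is_pyrimidine(letter):
--     lower_letter = letter.lower()
--     return lower_letter == "c" or lower_letter == "t"
--
-- def contains_transversion(list):
--     found_pyrimidine = False
--     found_purine = False
--     for letter in list:
--         if is_pyrimidine(letter):
--             found_pyrimidine = True
--         else:
--             found_purine = True
--     return found_purine and found_pyrimidine
-- ===== SOURCE B (Python) =====
-- def is_pyrimidine(letter):
--     lower_letter = letter.lower()
--     return lower_letter == "c" or lower_letter == "t"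
--
-- def contains_transversion(list):
--     # A transversion exists iff some element's class differs from the first's.
--     if not list:
--         return False
--     first_class = is_pyrimidine(list[0])
--     return any(is_pyrimidine(letter) != first_class for letter in list[1:])
-- ===== Notes on version B (the rewrite author's own statement) =====
-- stated objective: alternative
-- what changed: Instead of scanning with two boolean flags for 'saw pyrimidine'/'saw purine', B classifies the first element and returns whether any later element has the opposite class (a transversion exists iff some element's class differs from the first's).
import Mathlib
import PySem

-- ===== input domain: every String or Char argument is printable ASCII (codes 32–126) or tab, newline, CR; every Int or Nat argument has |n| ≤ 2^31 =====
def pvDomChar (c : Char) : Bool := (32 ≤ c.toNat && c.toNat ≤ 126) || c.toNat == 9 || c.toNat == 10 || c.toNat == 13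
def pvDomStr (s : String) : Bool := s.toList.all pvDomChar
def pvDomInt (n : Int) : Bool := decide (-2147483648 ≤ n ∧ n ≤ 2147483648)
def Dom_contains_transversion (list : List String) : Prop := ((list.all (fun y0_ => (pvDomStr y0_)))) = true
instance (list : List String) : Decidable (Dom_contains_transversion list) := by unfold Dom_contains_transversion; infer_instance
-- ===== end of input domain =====

-- B replaces A's two-flag scan by classifying the first element and asking whether any later element has the opposite class (objective: alternative).

-- ===== PORT A =====
def is_pyrimidine (letter : String) : Bool :=
  let lower_letter := PySem.Str.lower letter
  lower_letter == "c" || lower_letter == "t"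

def contains_transversion (list : List String) : Bool :=
  let st := list.foldl
    (fun (s : Bool × Bool) letter =>
      if is_pyrimidine letter then (true, s.2) else (s.1, true))
    (false, false)
  st.2 && st.1

-- ===== PORT B =====
def contains_transversion_alt (list : List String) : Bool :=
  match list with
  | [] => false
  | first :: rest =>
    let first_class := is_pyrimidine first
    rest.any (fun letter => is_pyrimidine letter != first_class)

-- ===== PRECONDITION & SPEC =====
def Spec_contains_transversion (list : List String) (out : Bool) : Prop := out = contains_transversion_alt list
instance (list : List String) (out : Bool) : Decidable (Spec_contains_transversion list out) := by unfold Spec_contains_transversion; infer_instance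

-- ===== CLAIM (what is proved, stated in full; the proofs are below) =====
def Claim_equal_contains_transversion : Prop := ∀ (list : List String), Dom_contains_transversion list → Spec_contains_transversion list (contains_transversion list)

-- ===== LEMMAS AND PROOFS =====

-- A's fold accumulates exactly "some pyrimidine seen" / "some non-pyrimidine seen".
theorem foldA_char (xs : List String) (p q : Bool) :
    xs.foldl
      (fun (s : Bool × Bool) letter =>
        if is_pyrimidine letter then (true, s.2) else (s.1, true))
      (p, q)
    = (p || xs.any is_pyrimidine, q || xs.any (fun l => !is_pyrimidine l)) := by
  induction xs generalizing p q with
  | nil => simp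
  | cons x xs ih =>
    by_cases h : is_pyrimidine x = true <;> simp [h, ih]

-- ===== VERDICT (by name: the statement is the Claim_ definition above) =====
theorem contains_transversion_spec : Claim_equal_contains_transversion := by
  intro list _
  show contains_transversion list = contains_transversion_alt list
  cases list with
  | nil => rfl
  | cons x xs =>
    unfold contains_transversion contains_transversion_alt
    simp only [foldA_char]
    by_cases h : is_pyrimidine x = true <;>
      simp [h]
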